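-- pv_equiv track=rewrite | github.com/LeDinhNguyen/Python | PFP191/Slot13/homework.py | Bai2
-- ===== SOURCE A (Python) =====
-- def Bai2(string: str) -> str:
--     lower_string = ""
--     upper_string = ""
--     for s in string:
--         if s.islower():
--             lower_string += s
--         if s.isupper():
--             upper_string += s
--
--
--     return lower_string + upper_string
-- ===== SOURCE B (Python) =====
-- def Bai2(string: str) -> str:
--     letters = [c for c in string if c.islower() or c.isupper()]
--     return ''.join(sorted(letters, key=str.isupper))
-- ===== Notes on version B (the rewrite author's own statement) =====
-- stated objective: idiomatic
-- what changed: Replaced the two-accumulator character-by-character string building with a filter of the cased letters followed by one stable sort keyed on isupper (lowercase first, order inside each group preserved by stability).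
import Mathlib
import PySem

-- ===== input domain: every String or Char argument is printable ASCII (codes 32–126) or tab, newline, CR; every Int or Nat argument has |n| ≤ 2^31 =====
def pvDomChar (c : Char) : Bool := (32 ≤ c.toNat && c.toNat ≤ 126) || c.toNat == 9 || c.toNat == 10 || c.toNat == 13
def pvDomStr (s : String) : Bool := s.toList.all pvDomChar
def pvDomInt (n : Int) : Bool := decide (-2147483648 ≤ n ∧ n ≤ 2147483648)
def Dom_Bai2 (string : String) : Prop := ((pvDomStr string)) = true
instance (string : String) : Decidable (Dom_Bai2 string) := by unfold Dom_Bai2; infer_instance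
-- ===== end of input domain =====

-- B replaces A's two-accumulator single pass with filter-the-cased-letters + one stable sort keyed on isupper (idiomatic; same return value).


-- ===== PORT A =====
def Bai2 (string : String) : String :=
  let r := string.toList.foldl
    (fun (acc : List Char × List Char) s =>
      let acc1 := if PySem.Chars.islower s then (acc.1 ++ [s], acc.2) else acc
      if PySem.Chars.isupper s then (acc1.1, acc1.2 ++ [s]) else acc1)
    ([], [])
  String.mk (r.1 ++ r.2)

-- ===== PORT B =====
def Bai2_alt (string : String) : String :=
  String.mk (PySem.List.sorted
    (string.toList.filter (fun c => PySem.Chars.islower c || PySem.Chars.isupper c))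
    (fun c => if PySem.Chars.isupper c then (1 : Nat) else 0) false)

-- ===== PRECONDITION & SPEC =====
def Spec_Bai2 (string : String) (out : String) : Prop := out = Bai2_alt string
instance (string : String) (out : String) : Decidable (Spec_Bai2 string out) := by unfold Spec_Bai2; infer_instance

-- ===== CLAIM (what is proved, stated in full; the proofs are below) =====
def Claim_equal_Bai2 : Prop := ∀ (string : String), Dom_Bai2 string → Spec_Bai2 string (Bai2 string)

-- ===== LEMMAS AND PROOFS =====

-- the sort key used by B
def pvKey (c : Char) : Nat := if PySem.Chars.isupper c then 1 else 0

theorem pv_disj_lu (c : Char) (h : PySem.Chars.islower c = true) :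
    PySem.Chars.isupper c = false := by
  simp only [PySem.Chars.islower, Bool.and_eq_true, decide_eq_true_eq] at h
  have hz : ¬ c ≤ 'Z' := fun h2 => absurd (le_trans h.1 h2) (by decide)
  simp [PySem.Chars.isupper, decide_eq_false hz]

-- A's fold collects exactly (filter islower, filter isupper)
theorem pv_foldA (l : List Char) (L U : List Char) :
    l.foldl
      (fun (acc : List Char × List Char) s =>
        let acc1 := if PySem.Chars.islower s then (acc.1 ++ [s], acc.2) else acc
        if PySem.Chars.isupper s then (acc1.1, acc1.2 ++ [s]) else acc1)
      (L, U)
    = (L ++ l.filter PySem.Chars.islower, U ++ l.filter PySem.Chars.isupper) := by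
  induction l generalizing L U with
  | nil => simp
  | cons x xs ih =>
    by_cases hl : PySem.Chars.islower x = true
    · simp [List.foldl_cons, hl, pv_disj_lu x hl, ih]
    · simp only [Bool.not_eq_true] at hl
      by_cases hu : PySem.Chars.isupper x = true
      · simp [List.foldl_cons, hl, hu, ih]
      · simp only [Bool.not_eq_true] at hu
        simp [List.foldl_cons, hl, hu, ih]

-- inserting a lowercase letter into "lows ++ ups" puts it at the end of the lows
theorem pv_ins_low (x : Char) (A B : List Char) (hx : PySem.Chars.isupper x = false)
    (hA : ∀ a ∈ A, PySem.Chars.isupper a = false)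
    (hB : ∀ b ∈ B, PySem.Chars.isupper b = true) :
    PySem.List.insertBy (fun a b => decide (pvKey a < pvKey b)) x (A ++ B) = A ++ x :: B := by
  induction A with
  | nil =>
    cases B with
    | nil => simp [PySem.List.insertBy]
    | cons b bs =>
      have hb := hB b (by simp)
      simp [PySem.List.insertBy, pvKey, hx, hb]
  | cons a as ih =>
    have ha := hA a (by simp)
    have hc : decide (pvKey x < pvKey a) = false := by simp [pvKey, ha, hx]
    simp only [List.cons_append, PySem.List.insertBy, hc, Bool.false_eq_true, if_false]
    rw [ih (fun y hy => hA y (List.mem_cons_of_mem a hy))]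

-- inserting an uppercase letter goes to the very end (its key 1 is maximal)
theorem pv_ins_high (x : Char) (L : List Char) (hx : PySem.Chars.isupper x = true) :
    PySem.List.insertBy (fun a b => decide (pvKey a < pvKey b)) x L = L ++ [x] := by
  induction L with
  | nil => simp [PySem.List.insertBy]
  | cons a as ih =>
    have h1 : pvKey x = 1 := by simp [pvKey, hx]
    have h2 : pvKey a ≤ 1 := by unfold pvKey; split <;> omega
    simp only [PySem.List.insertBy]
    rw [if_neg (by simp; omega), ih]
    simp

-- the insertion-sort fold keeps lows-then-ups, appending each new letter to its group
theorem pv_foldB (l : List Char) (A B : List Char)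
    (hA : ∀ a ∈ A, PySem.Chars.isupper a = false)
    (hB : ∀ b ∈ B, PySem.Chars.isupper b = true) :
    l.foldl (fun acc x => PySem.List.insertBy (fun a b => decide (pvKey a < pvKey b)) x acc)
      (A ++ B)
    = (A ++ l.filter (fun c => !PySem.Chars.isupper c)) ++ (B ++ l.filter PySem.Chars.isupper) := by
  induction l generalizing A B with
  | nil => simp
  | cons x xs ih =>
    by_cases hu : PySem.Chars.isupper x = true
    · rw [List.foldl_cons, pv_ins_high x (A ++ B) hu, List.append_assoc]
      rw [ih A (B ++ [x]) hA (by intro b hb; rcases List.mem_append.1 hb with h | h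
                                 · exact hB b h
                                 · simp at h; subst h; exact hu)]
      simp [hu]
    · simp only [Bool.not_eq_true] at hu
      rw [List.foldl_cons, pv_ins_low x A B hu hA hB,
        show A ++ x :: B = (A ++ [x]) ++ B by simp]
      rw [ih (A ++ [x]) B (by intro a ha; rcases List.mem_append.1 ha with h | h
                              · exact hA a h
                              · simp at h; subst h; exact hu) hB]
      simp [hu]

theorem pv_sorted_eq (l : List Char) :
    PySem.List.sorted l pvKey false
    = l.filter (fun c => !PySem.Chars.isupper c) ++ l.filter PySem.Chars.isupper := by
  have := pv_foldB l [] [] (by simp) (by simp)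
  simpa [PySem.List.sorted] using this

-- the two predicate combinations coincide pointwise (cased-letter ∧ ¬upper ↔ lower, etc.)
theorem pv_pred_low :
    (fun c => !PySem.Chars.isupper c && (PySem.Chars.islower c || PySem.Chars.isupper c))
    = PySem.Chars.islower := by
  funext c
  by_cases hl : PySem.Chars.islower c = true
  · simp [hl, pv_disj_lu c hl]
  · simp only [Bool.not_eq_true] at hl
    cases hu : PySem.Chars.isupper c <;> simp [hl]

theorem pv_pred_high :
    (fun c => PySem.Chars.isupper c && (PySem.Chars.islower c || PySem.Chars.isupper c))
    = PySem.Chars.isupper := by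
  funext c
  cases hu : PySem.Chars.isupper c <;> simp

-- ===== VERDICT (by name: the statement is the Claim_ definition above) =====
theorem Bai2_spec : Claim_equal_Bai2 := by
  intro s _
  unfold Spec_Bai2 Bai2 Bai2_alt
  rw [pv_foldA s.toList [] []]
  have : (fun c => if PySem.Chars.isupper c then (1:Nat) else 0) = pvKey := rfl
  rw [this, pv_sorted_eq, List.filter_filter, List.filter_filter, pv_pred_low, pv_pred_high]
  simp
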